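-- pv_equiv track=rewrite | github.com/EvgenyKoles/final_cs_magister | scripts/06_eval_aggregate.py | find_feature_by_patterns
-- ===== SOURCE A (Python) =====
-- from typing import Dict, List, Optional, Tuple
--
-- def find_feature_by_patterns(names: List[str], patterns: List[str]) -> Optional[str]:
--     ln = [n.lower() for n in names]
--     for pat in patterns:
--         pat = pat.lower()
--         for n, nl in zip(names, ln):
--             if nl == pat:
--                 return n
--         for n, nl in zip(names, ln):
--             if pat in nl:
--                 return n
--     return None
-- ===== SOURCE B (Python) =====
-- def find_feature_by_patterns(names, patterns):
--     pairs = [(n, n.lower()) for n in names]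
--     for pat in patterns:
--         p = pat.lower()
--         cand = None
--         for n, nl in pairs:
--             if nl == p:
--                 return n
--             if cand is None and p in nl:
--                 cand = n
--         if cand is not None:
--             return cand
--     return None
-- ===== Notes on version B (the rewrite author's own statement) =====
-- stated objective: alternative
-- what changed: B makes a single pass over the names per pattern, deferring the first substring match in a candidate variable so a later exact match still wins, instead of A's two separate scans per pattern.
import Mathlib
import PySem

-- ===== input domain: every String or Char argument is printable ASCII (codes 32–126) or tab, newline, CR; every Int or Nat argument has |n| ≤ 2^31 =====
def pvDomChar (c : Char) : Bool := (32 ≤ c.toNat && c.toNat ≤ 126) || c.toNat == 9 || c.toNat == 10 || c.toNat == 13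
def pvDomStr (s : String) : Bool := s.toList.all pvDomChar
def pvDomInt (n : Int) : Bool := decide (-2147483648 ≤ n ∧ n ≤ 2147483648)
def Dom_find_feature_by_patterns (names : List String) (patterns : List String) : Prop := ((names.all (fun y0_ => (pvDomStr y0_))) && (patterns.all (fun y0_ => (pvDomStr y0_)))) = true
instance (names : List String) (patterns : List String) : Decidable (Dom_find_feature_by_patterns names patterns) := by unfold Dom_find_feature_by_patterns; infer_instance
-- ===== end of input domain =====

-- B replaces A's two scans per pattern (exact, then substring) with a single pass that defers the first substring match as a candidate, so a later exact match still wins (alternative decomposition, same cost).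
-- ===== PORT A =====
-- two scans per pattern: exact match first, then substring match
def pvGoA (names : List String) (pairs : List (String × String)) : List String → Option String
  | [] => none
  | pat :: rest =>
    let p := PySem.Str.lower pat
    match pairs.find? (fun q => q.2 == p) with
    | some q => some q.1
    | none =>
      match pairs.find? (fun q => PySem.Str.isIn p q.2) with
      | some q => some q.1
      | none => pvGoA names pairs rest

def find_feature_by_patterns (names : List String) (patterns : List String) : Option String :=
  let ln := names.map PySem.Str.lower
  pvGoA names (names.zip ln) patterns

-- ===== PORT B =====
-- one scan per pattern, deferring the first substring match as a candidate
def pvScanB (p : String) : List (String × String) → Option String → Option String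
  | [], cand => cand
  | (n, nl) :: rest, cand =>
    if nl == p then some n
    else pvScanB p rest (if cand.isNone && PySem.Str.isIn p nl then some n else cand)

def pvGoB (pairs : List (String × String)) : List String → Option String
  | [] => none
  | pat :: rest =>
    match pvScanB (PySem.Str.lower pat) pairs none with
    | some n => some n
    | none => pvGoB pairs rest

def find_feature_by_patterns_alt (names : List String) (patterns : List String) : Option String :=
  pvGoB (names.map (fun n => (n, PySem.Str.lower n))) patterns

-- ===== PRECONDITION & SPEC =====
def Spec_find_feature_by_patterns (names : List String) (patterns : List String) (out : Option String) : Prop := out = find_feature_by_patterns_alt names patterns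
instance (names : List String) (patterns : List String) (out : Option String) : Decidable (Spec_find_feature_by_patterns names patterns out) := by unfold Spec_find_feature_by_patterns; infer_instance

-- ===== CLAIM (what is proved, stated in full; the proofs are below) =====
def Claim_equal_find_feature_by_patterns : Prop := ∀ (names : List String) (patterns : List String), Dom_find_feature_by_patterns names patterns → Spec_find_feature_by_patterns names patterns (find_feature_by_patterns names patterns)

-- ===== LEMMAS AND PROOFS =====

theorem pvScanB_some (p c : String) : ∀ (ps : List (String × String)),
    pvScanB p ps (some c) =
      match ps.find? (fun q => q.2 == p) with
      | some q => some q.1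
      | none => some c := by
  intro ps
  induction ps generalizing c with
  | nil => simp [pvScanB]
  | cons q rest ih =>
    obtain ⟨n, nl⟩ := q
    by_cases h : nl == p <;> simp [pvScanB, List.find?, h, ih]

theorem pvScanB_none (p : String) : ∀ (ps : List (String × String)),
    pvScanB p ps none =
      match ps.find? (fun q => q.2 == p) with
      | some q => some q.1
      | none =>
        match ps.find? (fun q => PySem.Str.isIn p q.2) with
        | some q => some q.1
        | none => none := by
  intro ps
  induction ps with
  | nil => simp [pvScanB]
  | cons q rest ih =>
    obtain ⟨n, nl⟩ := q
    by_cases h : nl == p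
    · simp [pvScanB, List.find?, h]
    · by_cases h2 : PySem.Str.isIn p nl
      · simp [pvScanB, List.find?, PySem.Str.isIn, h,
          show PySem.Chars.isIn p.toList nl.toList = true from h2, pvScanB_some]
      · simp [pvScanB, List.find?, PySem.Str.isIn, h,
          show PySem.Chars.isIn p.toList nl.toList = false from by
            simpa [PySem.Str.isIn] using h2, ih]

theorem pvGo_eq (names : List String) (pairs : List (String × String)) :
    ∀ (pats : List String), pvGoA names pairs pats = pvGoB pairs pats := by
  intro pats
  induction pats with
  | nil => rfl
  | cons pat rest ih =>
    simp only [pvGoA, pvGoB, pvScanB_none, ih]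
    generalize pairs.find? (fun q => q.2 == PySem.Str.lower pat) = o1
    generalize pairs.find? (fun q => PySem.Str.isIn (PySem.Str.lower pat) q.2) = o2
    cases o1 <;> cases o2 <;> rfl

theorem zip_map_self (f : String → String) : ∀ (l : List String),
    l.zip (l.map f) = l.map (fun n => (n, f n)) := by
  intro l; induction l with
  | nil => rfl
  | cons a t ih =>
    simp only [List.map, List.zip_cons_cons, ih]

-- ===== VERDICT (by name: the statement is the Claim_ definition above) =====
theorem find_feature_by_patterns_spec : Claim_equal_find_feature_by_patterns := by
  intro names patterns _
  show find_feature_by_patterns names patterns = find_feature_by_patterns_alt names patterns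
  show pvGoA names (names.zip (names.map PySem.Str.lower)) patterns = _
  rw [zip_map_self, pvGo_eq]
  rfl
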